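-- pv_equiv track=rewrite | github.com/kishanrajput23/NPTEL-The-Joy-of-Computing-using-Python | Week9/Week 9 Programming Assignment1.py | firstElement
-- ===== SOURCE A (Python) =====
-- def firstElement(arr, n, k):
--
--     # dictionary to count
--     # occurrences of
--     # each element
--     count_map = {};
--     for i in range(0, n):
--         if(arr[i] in count_map.keys()):
--             count_map[arr[i]] += 1
--         else:
--             count_map[arr[i]] = 1
--         i += 1
--
--     for i in range(0, n):
--
--         # if count of element == k ,
--         # then it is the required
--         # first element
--         if (count_map[arr[i]] == k):
--             return arr[i]
--         i += 1
-- ===== SOURCE B (Python) =====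
-- def firstElement(arr, n, k):
--     # peel off one distinct value per round, in order of first occurrence:
--     # each candidate's count is taken once, then all its copies are removed
--     rest = arr[:max(n, 0)]
--     while rest:
--         x = rest[0]
--         if rest.count(x) == k:
--             return x
--         rest = [y for y in rest if y != x]
--     return None
-- ===== Notes on version B (the rewrite author's own statement) =====
-- stated objective: alternative
-- what changed: Replaces the count-dictionary-plus-index-scan with a successive-elimination loop: take the first element of the remaining prefix, test its count once, and if it fails strip every copy of that value before repeating, so each distinct value is examined exactly once in first-occurrence order.
import Mathlib
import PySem

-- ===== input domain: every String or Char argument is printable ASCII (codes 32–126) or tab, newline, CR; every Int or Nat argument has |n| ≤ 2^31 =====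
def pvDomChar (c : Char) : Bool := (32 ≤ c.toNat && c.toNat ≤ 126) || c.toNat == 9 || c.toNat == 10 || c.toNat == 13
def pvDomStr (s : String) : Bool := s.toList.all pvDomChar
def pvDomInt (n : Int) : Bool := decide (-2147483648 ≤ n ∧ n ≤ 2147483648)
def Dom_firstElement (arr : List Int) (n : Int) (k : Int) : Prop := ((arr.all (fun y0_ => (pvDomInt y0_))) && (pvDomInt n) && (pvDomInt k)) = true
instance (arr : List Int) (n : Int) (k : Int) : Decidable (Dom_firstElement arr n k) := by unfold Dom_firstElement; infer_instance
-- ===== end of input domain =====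

-- B replaces A's count dictionary + index scan with a successive-elimination loop: test the head of
-- the remaining prefix once, then strip all its copies and repeat (alternative decomposition, no speed claim).

-- ===== PORT A =====
-- arr[i] is ported as pyGetD … 0, exact under Pre_ (0 ≤ i < n ≤ arr.length)
def firstElement (arr : List Int) (n : Int) (k : Int) : Option Int :=
  let cm : PySem.Dict Int Int :=
    (PySem.List.pyRange 0 n 1).foldl
      (fun m i =>
        let x := PySem.List.pyGetD arr i 0
        if m.contains x then m.insert x (m.getD x 0 + 1) else m.insert x 1)
      PySem.Dict.empty
  (PySem.List.pyRange 0 n 1).foldl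
    (fun acc i =>
      match acc with
      | some r => some r
      | none =>
        let x := PySem.List.pyGetD arr i 0
        if cm.getD x 0 == k then some x else none)
    none

-- ===== PORT B =====
-- the while-loop of Source B: head candidate, count it once, else drop all its copies
def pvPeel (k : Int) (rest : List Int) : Option Int :=
  match rest with
  | [] => none
  | x :: t =>
    if PySem.List.count (x :: t) x == k then some x
    else pvPeel k ((x :: t).filter (fun y => y != x))
termination_by rest.length
decreasing_by
  simp only [List.filter_cons, bne_self_eq_false, Bool.false_eq_true, if_false, List.length_cons]
  exact Nat.lt_succ_of_le (List.length_filter_le _ _)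

def firstElement_alt (arr : List Int) (n : Int) (k : Int) : Option Int :=
  pvPeel k (PySem.List.slice arr none (some (max n 0)))

-- ===== PRECONDITION & SPEC =====
-- A raises IndexError (arr[i]) whenever n exceeds the list length; those inputs are excluded.
def Pre_firstElement (arr : List Int) (n : Int) (k : Int) : Prop := n ≤ arr.length
instance (arr : List Int) (n : Int) (k : Int) : Decidable (Pre_firstElement arr n k) := by unfold Pre_firstElement; infer_instance
def pvWitness_firstElement : List Int × Int × Int := ([1, 2, 2, 3], 4, 2)

def Spec_firstElement (arr : List Int) (n : Int) (k : Int) (out : Option Int) : Prop := out = firstElement_alt arr n k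
instance (arr : List Int) (n : Int) (k : Int) (out : Option Int) : Decidable (Spec_firstElement arr n k out) := by unfold Spec_firstElement; infer_instance

-- ===== CLAIM (what is proved, stated in full; the proofs are below) =====
def Claim_equal_firstElement : Prop := ∀ (arr : List Int) (n : Int) (k : Int), Dom_firstElement arr n k → Pre_firstElement arr n k → Spec_firstElement arr n k (firstElement arr n k)

-- ===== LEMMAS AND PROOFS =====

-- one step of A's counting loop, seen through getD
lemma step_getD (m : PySem.Dict Int Int) (x v : Int) :
    ((if m.contains x then m.insert x (m.getD x 0 + 1) else m.insert x 1).getD v 0)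
      = m.getD v 0 + (if x = v then 1 else 0) := by
  by_cases hc : m.contains x = true
  · rw [if_pos hc, PySem.Dict.getD_insert]
    by_cases hv : v = x
    · subst hv; simp
    · have hx : ¬ x = v := by omega
      simp [hv, hx]
  · rw [if_neg hc, PySem.Dict.getD_insert]
    by_cases hv : v = x
    · subst hv
      rw [PySem.Dict.getD_of_not_contains m 0 (by simpa using hc)]
      simp
    · have hx : ¬ x = v := by omega
      simp [hv, hx]

-- the whole counting fold, over an arbitrary index list and start dict
lemma fold_getD (arr : List Int) (l : List Int) (d : PySem.Dict Int Int) (v : Int) :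
    ((l.foldl
        (fun m i =>
          let x := PySem.List.pyGetD arr i 0
          if m.contains x then m.insert x (m.getD x 0 + 1) else m.insert x 1)
        d).getD v 0)
      = d.getD v 0 + ((l.map (fun i => PySem.List.pyGetD arr i 0)).count v : Int) := by
  induction l generalizing d with
  | nil => simp
  | cons i t ih =>
    simp only [List.foldl_cons, List.map_cons]
    rw [ih, step_getD]
    rw [List.count_cons]
    by_cases h : PySem.List.pyGetD arr i 0 = v
    · simp [h]; ring
    · simp [h]

-- the indices 0..n-1 read exactly the first-n prefix (needs n ≤ length)
lemma map_prefix (arr : List Int) (n : Int) (hn : 0 ≤ n) (hlen : n ≤ arr.length) :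
    (PySem.List.pyRange 0 n 1).map (fun i => PySem.List.pyGetD arr i 0) = arr.take n.toNat := by
  have h1 : (PySem.List.pyRange 0 ((arr.take n.toNat).length : Int) 1).map
      (fun i => PySem.List.pyGetD (arr.take n.toNat) i 0) = arr.take n.toNat := by
    simpa using PySem.List.map_pyGetD_pyRange_zero' (arr.take n.toNat) 0
  have hl : ((arr.take n.toNat).length : Int) = n := by
    simp [List.length_take]; omega
  rw [hl] at h1
  rw [← h1]
  apply List.map_congr_left
  intro i hi
  have hi' := (PySem.List.mem_pyRange_one).1 hi
  rw [PySem.List.pyGetD_eq_getElem arr 0 (by omega) (by omega),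
      PySem.List.pyGetD_eq_getElem (arr.take n.toNat) 0 (by omega)
        (by simp [List.length_take]; omega)]
  simp [List.getElem_take]

-- a fold that keeps the first hit IS find?
lemma foldl_find (q : Int → Bool) (l : List Int) (acc : Option Int) :
    l.foldl (fun acc x => match acc with
                          | some r => some r
                          | none => if q x then some x else none) acc
      = match acc with | some r => some r | none => l.find? q := by
  induction l generalizing acc with
  | nil => cases acc <;> rfl
  | cons x t ih =>
    cases acc with
    | some r => simp [List.foldl_cons, ih]
    | none =>
      simp only [List.foldl_cons]
      by_cases h : q x = true
      · simp [h, ih]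
      · simp [h, ih]

-- filtering away a value the predicate rejects does not change find?
lemma find?_filter_ne (q : Int → Bool) (x : Int) (hx : q x = false) :
    ∀ (t : List Int), (t.filter (fun y => y != x)).find? q = t.find? q := by
  intro t
  induction t with
  | nil => rfl
  | cons y s ih =>
    by_cases hy : y = x
    · subst hy
      simp [hx, ih]
    · have : (y != x) = true := by simp [hy]
      simp only [List.filter_cons, this, if_pos]
      rw [List.find?_cons, List.find?_cons]
      cases h : q y
      · simp [ih]
      · simp

-- B's elimination loop computes find? of the fixed whole-prefix predicate,
-- as long as every surviving value keeps its full count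
lemma peel_eq_find (k : Int) (P : List Int) :
    ∀ (m : Nat) (rest : List Int), rest.length ≤ m →
      (∀ y ∈ rest, rest.count y = P.count y) →
      pvPeel k rest = rest.find? (fun x => ((P.count x : Int) == k)) := by
  intro m
  induction m with
  | zero =>
    intro rest hlen _
    have : rest = [] := List.eq_nil_of_length_eq_zero (Nat.le_zero.1 hlen)
    subst this; rw [pvPeel]; rfl
  | succ m ih =>
    intro rest hlen hinv
    match rest with
    | [] => rw [pvPeel]; rfl
    | x :: t =>
      have hcx : (x :: t).count x = P.count x := hinv x (by simp)
      rw [pvPeel]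
      have hcnt : PySem.List.count (x :: t) x = ((x :: t).count x : Int) := by
        simp [PySem.List.count_eq]
      rw [hcnt, hcx]
      by_cases h : ((P.count x : Int) == k) = true
      · rw [if_pos h, List.find?_cons, h]
      · have hfalse : ((P.count x : Int) == k) = false := by
          cases hb : ((P.count x : Int) == k) with
          | true => exact absurd hb h
          | false => rfl
        rw [if_neg h]
        have hhead : ((x :: t).filter (fun y => y != x)) = t.filter (fun y => y != x) := by
          simp
        rw [hhead]
        have hlen' : (t.filter (fun y => y != x)).length ≤ m :=
          le_trans (List.length_filter_le _ _) (Nat.lt_succ_iff.1 (Nat.lt_of_lt_of_le (Nat.lt_succ_of_le (Nat.le_refl _)) hlen))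
        have hinv' : ∀ y ∈ t.filter (fun y => y != x),
            (t.filter (fun y => y != x)).count y = P.count y := by
          intro y hy
          have hmem := List.mem_filter.1 hy
          have hyx : y ≠ x := by simpa using hmem.2
          have h1 : (t.filter (fun y => y != x)).count y = t.count y := by
            rw [List.count_filter]
            simp [hyx]
          have hxy : ¬ x = y := fun h => hyx h.symm
          have h2 : (x :: t).count y = t.count y := by
            rw [List.count_cons]
            simp [hxy]
          rw [h1, ← h2]
          exact hinv y (by simp [hmem.1])
        rw [ih _ hlen' hinv', find?_filter_ne _ x hfalse, List.find?_cons, hfalse]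

-- ===== VERDICT (by name: the statement is the Claim_ definition above) =====
theorem firstElement_spec : Claim_equal_firstElement := by
  intro arr n k _ hpre
  unfold Spec_firstElement firstElement firstElement_alt
  have hmax : (0 : Int) ≤ max n 0 := le_max_right n 0
  have hmaxlen : max n 0 ≤ (arr.length : Int) := by
    rcases le_or_gt n 0 with h | h
    · simp [max_eq_right h]
    · rw [max_eq_left (by omega)]; exact hpre
  have hslice : PySem.List.slice arr none (some (max n 0)) = arr.take n.toNat := by
    rw [PySem.List.slice_to arr hmax]
    congr 1
    omega
  rw [hslice]
  set P := arr.take n.toNat with hP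
  have hB : pvPeel k P = P.find? (fun x => ((P.count x : Int) == k)) :=
    peel_eq_find k P P.length P (Nat.le_refl _) (fun y _ => rfl)
  rw [hB]
  by_cases hn : n ≤ 0
  · rw [PySem.List.pyRange_one_eq_nil (by omega)]
    have : P = [] := by simp [hP, Int.toNat_of_nonpos hn]
    rw [this]; rfl
  · push Not at hn
    have hstep :
        (PySem.List.pyRange 0 n 1).foldl
          (fun acc i =>
            match acc with
            | some r => some r
            | none =>
              let x := PySem.List.pyGetD arr i 0
              if ((PySem.List.pyRange 0 n 1).foldl
                    (fun m j =>
                      let x := PySem.List.pyGetD arr j 0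
                      if m.contains x then m.insert x (m.getD x 0 + 1) else m.insert x 1)
                    PySem.Dict.empty).getD x 0 == k then some x else none)
          none
        = (PySem.List.pyRange 0 n 1).foldl
          (fun acc i =>
            match acc with
            | some r => some r
            | none =>
              if ((P.count (PySem.List.pyGetD arr i 0) : Int) == k)
              then some (PySem.List.pyGetD arr i 0) else none)
          none := by
      apply PySem.List.foldl_congr_mem
      intro acc i _
      match acc with
      | some r => rfl
      | none =>
        simp only
        rw [fold_getD, map_prefix arr n (by omega) hpre]
        simp [hP]
    rw [hstep]
    have hmap :
        (PySem.List.pyRange 0 n 1).foldl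
          (fun acc i =>
            match acc with
            | some r => some r
            | none =>
              if ((P.count (PySem.List.pyGetD arr i 0) : Int) == k)
              then some (PySem.List.pyGetD arr i 0) else none)
          none
        = ((PySem.List.pyRange 0 n 1).map (fun i => PySem.List.pyGetD arr i 0)).foldl
          (fun acc x =>
            match acc with
            | some r => some r
            | none => if ((P.count x : Int) == k) then some x else none)
          none := by
      rw [List.foldl_map]
    rw [hmap, map_prefix arr n (by omega) hpre, ← hP,
        foldl_find (fun x => ((P.count x : Int) == k)) P none]
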